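-- pv_equiv track=rewrite | github.com/Sprounix/cognee | cognee/extensions/tasks/match_jobs.py | get_last_work_experience
-- ===== SOURCE A (Python) =====
-- def get_last_work_experience(work_experiences):
--     if not work_experiences:
--         return {}
--     experiences = [w for w in work_experiences if w.get("start_date")]
--     if not experiences:
--         return
--     experiences = sorted(experiences, key=lambda x: x["start_date"], reverse=True)
--     last_experience = experiences[0]
--     return last_experience
-- ===== SOURCE B (Python) =====
-- def get_last_work_experience(work_experiences):
--     if not work_experiences:
--         return {}
--     best = None
--     for w in work_experiences:
--         sd = w.get("start_date")
--         if not sd: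
--             continue
--         if best is None or sd > best["start_date"]:
--             best = w
--     return best
-- ===== Notes on version B (the rewrite author's own statement) =====
-- stated objective: simpler
-- what changed: Replaces the filter + stable reverse-sort + take-first-element pipeline by a single linear scan keeping a running argmax (strict > so the first element among equal start_dates wins, as the stable reverse sort does).
import Mathlib
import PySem

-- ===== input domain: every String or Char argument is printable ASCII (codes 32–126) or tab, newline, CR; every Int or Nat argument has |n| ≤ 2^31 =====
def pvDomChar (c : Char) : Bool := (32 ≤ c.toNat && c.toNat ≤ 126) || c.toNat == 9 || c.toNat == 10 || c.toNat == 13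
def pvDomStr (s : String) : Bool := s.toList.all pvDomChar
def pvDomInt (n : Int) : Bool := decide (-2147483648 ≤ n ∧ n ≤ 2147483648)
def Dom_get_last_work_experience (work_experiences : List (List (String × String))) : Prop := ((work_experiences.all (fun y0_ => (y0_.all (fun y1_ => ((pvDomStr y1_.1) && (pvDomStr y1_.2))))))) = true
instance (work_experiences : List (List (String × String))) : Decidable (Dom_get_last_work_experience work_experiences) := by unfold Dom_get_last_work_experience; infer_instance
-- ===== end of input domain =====

-- B replaces A's filter + stable reverse-sort + first-element pipeline by one linear
-- running-argmax scan (strict > keeps the first among start_date ties); objective: simpler.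

-- ===== PORT A =====
-- `w.get("start_date")` truthiness: present and nonempty ⇔ getD "" ≠ "".
def gle_key (w : List (String × String)) : String :=
  (PySem.Dict.get? (PySem.Dict.mk w) "start_date").getD ""

def get_last_work_experience (work_experiences : List (List (String × String))) : Option (List (String × String)) :=
  if work_experiences = [] then some []   -- `return {}`
  else
    let experiences := work_experiences.filter (fun w => gle_key w != "")
    if experiences = [] then none         -- bare `return`
    else
      let sortedE := PySem.List.sorted experiences (fun x => gle_key x) true
      PySem.List.pyGet? sortedE 0         -- experiences[0] (list is nonempty)

-- ===== PORT B =====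
def gle_step (best : Option (List (String × String))) (w : List (String × String)) :
    Option (List (String × String)) :=
  let sd := gle_key w
  if sd = "" then best                    -- `if not sd: continue`
  else
    match best with
    | none => some w
    | some b => if gle_key b < sd then some w else best

def get_last_work_experience_alt (work_experiences : List (List (String × String))) : Option (List (String × String)) :=
  if work_experiences = [] then some []
  else work_experiences.foldl gle_step none

-- ===== PRECONDITION & SPEC =====
def Spec_get_last_work_experience (work_experiences : List (List (String × String))) (out : Option (List (String × String))) : Prop := out = get_last_work_experience_alt work_experiences
instance (work_experiences : List (List (String × String))) (out : Option (List (String × String))) : Decidable (Spec_get_last_work_experience work_experiences out) := by unfold Spec_get_last_work_experience; infer_instance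

-- ===== CLAIM (what is proved, stated in full; the proofs are below) =====
def Claim_equal_get_last_work_experience : Prop := ∀ (work_experiences : List (List (String × String))), Dom_get_last_work_experience work_experiences → Spec_get_last_work_experience work_experiences (get_last_work_experience work_experiences)

-- ===== LEMMAS AND PROOFS =====

-- the running-argmax update on the filtered list
def gle_upd (best : Option (List (String × String))) (w : List (String × String)) :
    Option (List (String × String)) :=
  match best with
  | none => some w
  | some b => if gle_key b < gle_key w then some w else best

-- gle_step unfolded through the filter test
theorem gle_step_eq (acc : Option (List (String × String))) (w : List (String × String)) :
    gle_step acc w = if gle_key w = "" then acc else gle_upd acc w := rfl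

-- B's fold over the raw list is the update fold over the filtered list
theorem foldl_step_eq_filter (ws : List (List (String × String)))
    (acc : Option (List (String × String))) :
    ws.foldl gle_step acc = (ws.filter (fun w => gle_key w != "")).foldl gle_upd acc := by
  induction ws generalizing acc with
  | nil => rfl
  | cons w t ih =>
    by_cases h : gle_key w = ""
    · simp [h, gle_step_eq, ih]
    · simp [h, gle_step_eq, ih]

-- head of an insertion step = one argmax update
theorem head_insertBy (x : List (String × String)) (acc : List (List (String × String))) :
    (PySem.List.insertBy (fun a b => decide (gle_key b < gle_key a)) x acc).head?
      = gle_upd acc.head? x := by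
  cases acc with
  | nil => rfl
  | cons y ys =>
    by_cases h : gle_key y < gle_key x
    · simp [PySem.List.insertBy, h, gle_upd]
    · simp [PySem.List.insertBy, h, gle_upd]

-- head of the insertion-sort fold = the argmax fold
theorem head_foldl_insertBy (es : List (List (String × String)))
    (acc : List (List (String × String))) :
    (es.foldl (fun a x => PySem.List.insertBy (fun a b => decide (gle_key b < gle_key a)) x a) acc).head?
      = es.foldl gle_upd acc.head? := by
  induction es generalizing acc with
  | nil => rfl
  | cons x t ih => rw [List.foldl_cons, List.foldl_cons, ih, head_insertBy]

theorem head_sorted_rev (es : List (List (String × String))) :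
    (PySem.List.sorted es (fun x => gle_key x) true).head? = es.foldl gle_upd none := by
  rw [PySem.List.sorted_rev_eq_foldl_insertBy]
  simpa using head_foldl_insertBy es []

-- ===== VERDICT (by name: the statement is the Claim_ definition above) =====
theorem get_last_work_experience_spec : Claim_equal_get_last_work_experience := by
  intro ws _
  unfold Spec_get_last_work_experience get_last_work_experience get_last_work_experience_alt
  by_cases hws : ws = []
  · simp [hws]
  · simp only [hws, if_false]
    rw [foldl_step_eq_filter]
    set es := ws.filter (fun w => gle_key w != "") with hes
    by_cases he : es = []
    · simp [he]
    · simp only [he, if_false]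
      have hhead := head_sorted_rev es
      rcases hs : PySem.List.sorted es (fun x => gle_key x) true with _ | ⟨m, t⟩
      · exact absurd ((PySem.List.sorted_eq_nil_iff es _ true).mp hs) he
      · rw [hs] at hhead
        simp [PySem.List.pyGet?, PySem.List.pyIdx?, ← hhead]
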